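-- pv_equiv track=rewrite | github.com/KU-MIDS-MO/assignment2-introp-25-26-naphon1999 | swap_ends.py | swap_ends
-- ===== SOURCE A (Python) =====
-- def swap_ends(L, k):
--     if k <= 0:
--         return L.copy(), 0
--     if k > len(L)//2 :
--         return L.copy(), 0
--     if L == []:
--         return L.copy(), 0
--
--     new_list = L.copy()
--     for i in range(k):
--         new_list[i], new_list[-k + i] = new_list[-k + i], new_list[i]
--     return new_list, k
-- ===== SOURCE B (Python) =====
-- def swap_ends(L, k):
--     if k <= 0:
--         return L.copy(), 0
--     if k > len(L)//2:
--         return L.copy(), 0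
--     if L == []:
--         return L.copy(), 0
--     return L[-k:] + L[k:-k] + L[:k], k
-- ===== Notes on version B (the rewrite author's own statement) =====
-- stated objective: idiomatic
-- what changed: Replaces the copy-then-index-swap loop with direct construction of the result by slice concatenation L[-k:] + L[k:-k] + L[:k].
import Mathlib
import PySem

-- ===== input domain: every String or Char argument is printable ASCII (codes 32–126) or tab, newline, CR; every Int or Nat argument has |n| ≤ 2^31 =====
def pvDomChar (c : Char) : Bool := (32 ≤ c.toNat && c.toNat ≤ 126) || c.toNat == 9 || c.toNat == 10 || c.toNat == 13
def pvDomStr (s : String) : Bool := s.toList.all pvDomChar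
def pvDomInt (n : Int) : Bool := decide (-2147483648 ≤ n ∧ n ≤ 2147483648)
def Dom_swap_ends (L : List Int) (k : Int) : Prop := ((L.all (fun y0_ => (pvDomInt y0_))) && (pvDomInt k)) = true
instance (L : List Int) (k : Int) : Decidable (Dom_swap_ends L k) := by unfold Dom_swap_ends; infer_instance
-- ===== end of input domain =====

-- B builds the result by slice concatenation L[-k:] + L[k:-k] + L[:k] instead of A's
-- copy-and-swap index loop (idiomatic decomposition; same guards, same return value).

-- ===== PORT A =====
-- one iteration of A's loop body: new_list[i], new_list[-k+i] = new_list[-k+i], new_list[i]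
def swapStep (k : Int) (nl : List Int) (i : Int) : List Int :=
  PySem.List.pySetD (PySem.List.pySetD nl i (PySem.List.pyGetD nl (-k + i) 0)) (-k + i)
    (PySem.List.pyGetD nl i 0)

def swap_ends (L : List Int) (k : Int) : List Int × Int :=
  if k ≤ 0 then (L, 0)
  else if PySem.Int.floordiv (PySem.List.len L) 2 < k then (L, 0)
  else if L = [] then (L, 0)
  else
    let new_list := (PySem.List.pyRange 0 k 1).foldl (swapStep k) L
    (new_list, k)

-- ===== PORT B =====
def swap_ends_alt (L : List Int) (k : Int) : List Int × Int :=
  if k ≤ 0 then (L, 0)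
  else if PySem.Int.floordiv (PySem.List.len L) 2 < k then (L, 0)
  else if L = [] then (L, 0)
  else (PySem.List.slice L (some (-k)) none
        ++ PySem.List.slice L (some k) (some (-k))
        ++ PySem.List.slice L none (some k), k)

-- ===== PRECONDITION & SPEC =====
def Spec_swap_ends (L : List Int) (k : Int) (out : List Int × Int) : Prop := out = swap_ends_alt L k
instance (L : List Int) (k : Int) (out : List Int × Int) : Decidable (Spec_swap_ends L k out) := by unfold Spec_swap_ends; infer_instance

-- ===== CLAIM (what is proved, stated in full; the proofs are below) =====
def Claim_equal_swap_ends : Prop := ∀ (L : List Int) (k : Int), Dom_swap_ends L k → Spec_swap_ends L k (swap_ends L k)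

-- ===== LEMMAS AND PROOFS =====

-- the state of A's loop after j iterations (j ≤ m, m = k, n = L.length, 2*m ≤ n)
def loopState (L : List Int) (m j : Nat) : List Int :=
  (L.drop (L.length - m)).take j
    ++ (L.drop j).take (L.length - m - j)
    ++ L.take j
    ++ L.drop (L.length - m + j)

theorem length_loopState (L : List Int) (m j : Nat) (hj : j ≤ m) (h2 : 2*m ≤ L.length) :
    (loopState L m j).length = L.length := by
  simp [loopState]; omega

theorem loopState_zero (L : List Int) (m : Nat) : loopState L m 0 = L := by
  simp [loopState]

theorem pySetD_neg_natCast (xs : List Int) (c : Nat) (v : Int) (h1 : 0 < c) (h2 : c ≤ xs.length) :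
    PySem.List.pySetD xs (-(c:Int)) v = xs.set (xs.length - c) v := by
  have hc : c ≠ 0 := by omega
  simp [PySem.List.pySetD, PySem.List.pySet?, PySem.List.pyIdx?, hc, h2]

theorem slice_natCast_neg (xs : List Int) (a c : Nat) (hc : 0 < c) :
    PySem.List.slice xs (some (a:Int)) (some (-(c:Int))) = (xs.drop a).take (xs.length - c - a) := by
  simp [PySem.List.slice, PySem.List.clampIdx]
  split_ifs with h1 h2 <;> try omega
  · rw [show xs.length - c - a = 0 by omega]; simp
  · by_cases ha : a ≤ xs.length
    · rw [show min a xs.length = a by omega]; congr 1; omega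
    · rw [List.drop_eq_nil_of_le (by omega), List.drop_eq_nil_of_le (by omega)]; simp

theorem getElem?_loopState (L : List Int) (m j p : Nat) (hj : j ≤ m) (h2 : 2*m ≤ L.length) :
    (loopState L m j)[p]? =
      if p < j then L[L.length - m + p]?
      else if p < L.length - m then L[p]?
      else if p < L.length - m + j then L[p - (L.length - m)]?
      else L[p]? := by
  simp only [loopState, List.getElem?_append, List.getElem?_take, List.getElem?_drop,
    List.length_append, List.length_take, List.length_drop]
  split_ifs <;> first | rfl | (congr 1; omega)

theorem getD_set (l : List Int) (i j : Nat) (a : Int) :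
    (l.set i a).getD j 0 = if i = j ∧ i < l.length then a else l.getD j 0 := by
  rw [List.getD_eq_getElem?_getD, List.getElem?_set]
  by_cases h1 : i = j
  · subst h1
    by_cases h2 : i < l.length
    · simp [h2]
    · simp [h2, List.getD_eq_getElem?_getD]
  · simp [h1, List.getD_eq_getElem?_getD]

theorem getD_loopState (L : List Int) (m j p : Nat) (hj : j ≤ m) (h2 : 2*m ≤ L.length) :
    (loopState L m j).getD p 0 =
      if p < j then L.getD (L.length - m + p) 0
      else if p < L.length - m then L.getD p 0
      else if p < L.length - m + j then L.getD (p - (L.length - m)) 0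
      else L.getD p 0 := by
  rw [List.getD_eq_getElem?_getD, getElem?_loopState L m j p hj h2]
  split_ifs <;> rw [List.getD_eq_getElem?_getD]

theorem swapStep_loopState (L : List Int) (m j : Nat) (hj : j < m) (h2 : 2*m ≤ L.length) :
    swapStep (m : Int) (loopState L m j) (j : Int) = loopState L m (j+1) := by
  have hn : (loopState L m j).length = L.length := length_loopState L m j (by omega) h2
  have hneg : -(m:Int) + (j:Int) = -(((m - j : Nat)):Int) := by
    push_cast [Nat.cast_sub (le_of_lt hj)]; ring
  have hva : PySem.List.pyGetD (loopState L m j) (-(((m - j : Nat)):Int)) 0 =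
      L.getD (L.length - m + j) 0 := by
    rw [PySem.List.pyGetD_neg_natCast _ _ _ (by omega) (by omega)]
    rw [← List.getD_eq_getElem (loopState L m j) 0 (by omega)]
    rw [hn, show L.length - (m - j) = L.length - m + j from by omega]
    rw [getD_loopState L m j _ (by omega) h2,
        if_neg (by omega), if_neg (by omega), if_neg (by omega)]
  have hvb : PySem.List.pyGetD (loopState L m j) ((j : Nat) : Int) 0 = L.getD j 0 := by
    rw [PySem.List.pyGetD_natCast]
    rw [getD_loopState L m j j (by omega) h2, if_neg (by omega), if_pos (by omega)]
  unfold swapStep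
  rw [hneg, PySem.List.pySetD_natCast, hva,
      pySetD_neg_natCast _ _ _ (by omega) (by rw [List.length_set, hn]; omega), hvb,
      List.length_set, hn]
  have hlen : (((loopState L m j).set j (L.getD (L.length - m + j) 0)).set
        (L.length - (m - j)) (L.getD j 0)).length = (loopState L m (j+1)).length := by
    rw [List.length_set, List.length_set, hn, length_loopState L m (j+1) (by omega) h2]
  refine List.ext_getElem hlen ?_
  intro p hp1 hp2
  have hpoint : (((loopState L m j).set j (L.getD (L.length - m + j) 0)).set
        (L.length - (m - j)) (L.getD j 0)).getD p 0 = (loopState L m (j+1)).getD p 0 := by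
    rw [getD_set, getD_set, List.length_set, hn,
        getD_loopState L m (j+1) p (by omega) h2,
        getD_loopState L m j p (by omega) h2]
    have harr : ∀ x y : Nat, x = y → L.getD x 0 = L.getD y 0 := fun x y h => by rw [h]
    split_ifs <;> first | rfl | (exfalso; omega) | (apply harr; omega)
  rw [List.getD_eq_getElem _ _ hp1, List.getD_eq_getElem _ _ hp2] at hpoint
  exact hpoint

theorem foldl_swapStep_upto (L : List Int) (m : Nat) (h2 : 2*m ≤ L.length) :
    ∀ j, j ≤ m → (PySem.List.pyRange 0 (j:Int) 1).foldl (swapStep (m:Int)) L = loopState L m j := by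
  intro j
  induction j with
  | zero =>
      intro _
      rw [PySem.List.pyRange_one_eq_nil (by omega), loopState_zero L m]
      rfl
  | succ i ih =>
      intro h
      rw [show ((i+1 : Nat) : Int) = ((i:Nat):Int) + 1 by push_cast; ring]
      rw [PySem.List.pyRange_one_succ_right (by positivity), List.foldl_append]
      simp only [List.foldl_cons, List.foldl_nil]
      rw [ih (by omega), swapStep_loopState L m i (by omega) h2]

theorem loopState_full (L : List Int) (m : Nat) (h2 : 2*m ≤ L.length) :
    loopState L m m =
      L.drop (L.length - m) ++ (L.drop m).take (L.length - m - m) ++ L.take m := by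
  have e1 : (L.drop (L.length - m)).take m = L.drop (L.length - m) :=
    List.take_of_length_le (by rw [List.length_drop]; omega)
  have e2 : L.drop (L.length - m + m) = ([] : List Int) :=
    List.drop_eq_nil_of_le (by omega)
  unfold loopState
  rw [e1, e2]
  simp [List.append_assoc]

-- ===== VERDICT (by name: the statement is the Claim_ definition above) =====
theorem swap_ends_spec : Claim_equal_swap_ends := by
  intro L k _
  unfold Spec_swap_ends swap_ends swap_ends_alt
  split_ifs with h1 h2 h3
  · rfl
  · rfl
  · rfl
  · have hfd : PySem.Int.floordiv (PySem.List.len L) 2 = (L.length : Int) / 2 := by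
      rw [PySem.List.len_eq]; exact PySem.Int.floordiv_eq_ediv_of_pos (by omega)
    have hk2 : 2 * k ≤ (L.length : Int) := by rw [hfd] at h2; omega
    have hk1 : 1 ≤ k := by omega
    have hkm : k = (k.toNat : Int) := by omega
    have hmn : 2 * k.toNat ≤ L.length := by omega
    rw [hkm]
    rw [foldl_swapStep_upto L k.toNat hmn k.toNat (le_refl _), loopState_full L k.toNat hmn]
    rw [PySem.List.slice_from_neg_natCast _ _ (by omega),
        slice_natCast_neg L k.toNat k.toNat (by omega),
        PySem.List.slice_to_natCast]
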